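-- pv_equiv track=rewrite | github.com/chestnutcase/cis2018-showface | codeitsuisse/routes/broadcaster.py | most_connected
-- ===== SOURCE A (Python) =====
-- def most_connected(connected_input):
--     datas = connected_input["data"]
--     dic = {}
--
--     for data in datas:
--         sender, recevier = data.split("->")
--         if sender in dic:
--             dic[sender].append(recevier)
--         else:
--             dic[sender] = [recevier]
--
--         if recevier in dic:
--             dic[recevier].append(sender)
--         else:
--             dic[recevier] = [sender]
--
--     diclist = [x for x in list(dic.items())]
--     lengths = [len(x[1]) for x in diclist]
--     result = diclist[lengths.index(max(lengths))][0]
--     return {"result":result}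
-- ===== SOURCE B (Python) =====
-- def most_connected(connected_input):
--     ends = []
--     for data in connected_input["data"]:
--         sender, receiver = data.split("->")
--         ends.append(sender)
--         ends.append(receiver)
--     best, bestc = None, -1
--     for x in ends:
--         c = ends.count(x)
--         if c > bestc:
--             best, bestc = x, c
--     return {"result": best}
-- ===== Notes on version B (the rewrite author's own statement) =====
-- stated objective: alternative
-- what changed: B eliminates the dictionary and neighbor lists entirely: it flattens every edge into a flat list of endpoint occurrences and selects the winner in one strict-improvement scan using list.count, instead of A's dict of neighbor lists followed by items/lengths/index(max) passes; the first-appearance tie-breaking is preserved because a later node with an equal count never strictly improves.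
import Mathlib
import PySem

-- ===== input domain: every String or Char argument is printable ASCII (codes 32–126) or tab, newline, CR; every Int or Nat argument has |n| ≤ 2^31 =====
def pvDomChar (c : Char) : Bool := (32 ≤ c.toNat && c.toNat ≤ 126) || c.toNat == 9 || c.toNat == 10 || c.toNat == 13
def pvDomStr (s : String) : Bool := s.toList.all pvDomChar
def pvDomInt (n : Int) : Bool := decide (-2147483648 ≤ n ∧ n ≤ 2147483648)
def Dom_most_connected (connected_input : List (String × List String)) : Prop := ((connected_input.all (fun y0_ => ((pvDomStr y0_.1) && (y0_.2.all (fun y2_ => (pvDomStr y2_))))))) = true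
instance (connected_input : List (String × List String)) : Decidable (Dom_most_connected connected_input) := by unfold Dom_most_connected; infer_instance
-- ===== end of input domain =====

-- ===== PORT A =====
-- B drops A's dict of neighbor lists entirely: it flattens the edges into one flat
-- list of endpoint occurrences and selects the winner by a strict-improvement scan
-- over list.count (same value wherever A returns).
-- the body of A's for-loop (one edge string)
def pvStepA (d : PySem.Dict String (List String)) (s : String) : PySem.Dict String (List String) :=
  match PySem.Str.split? s "->" with
  | some [sender, recevier] =>
    let d1 := if d.contains sender then d.modify sender [] (fun v => v ++ [recevier])
              else d.insert sender [recevier]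
    if d1.contains recevier then d1.modify recevier [] (fun v => v ++ [sender])
    else d1.insert recevier [sender]
  | _ => d   -- unpacking error path excluded by Pre_

def most_connected (connected_input : List (String × List String)) : List (String × String) :=
  match connected_input.lookup "data" with
  | none => []          -- Python: KeyError (excluded by Pre_)
  | some datas =>
    let dic := datas.foldl pvStepA PySem.Dict.empty
    let diclist := dic.items
    let lengths := diclist.map (fun x => ((x.2.length : Int)))
    match PySem.List.max? lengths (fun y => y) with
    | some m =>
      match PySem.List.index? lengths m with
      | some i =>
        match diclist[i]? with
        | some p => [("result", p.1)]
        | none => []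
      | none => []
    | none => []          -- Python: ValueError on max([]) (excluded by Pre_)

-- ===== PORT B =====
-- the body of B's first for-loop (one edge string appends its two endpoints)
def pvEndsStep (acc : List String) (s : String) : List String :=
  match PySem.Str.split? s "->" with
  | some [sender, recevier] => acc ++ [sender, recevier]
  | _ => acc   -- unpacking error path excluded by Pre_

def most_connected_alt (connected_input : List (String × List String)) : List (String × String) :=
  match connected_input.lookup "data" with
  | none => []
  | some datas =>
    let ends := datas.foldl pvEndsStep []
    let r := ends.foldl
      (fun s x =>
        let c : Int := (PySem.List.count ends x : Int)
        if c > s.2 then (some x, c) else s)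
      ((none : Option String), (-1 : Int))
    match r.1 with
    | some b => [("result", b)]
    | none => []   -- Python: {"result": None} (empty data is excluded by Pre_)

-- ===== PRECONDITION & SPEC =====
-- Pre_ excludes exactly the inputs where Python A raises: a missing "data" key (KeyError),
-- an empty data list (ValueError from max([])), and an entry whose split("->") does not
-- yield exactly two pieces (ValueError from unpacking).
def Pre_most_connected (connected_input : List (String × List String)) : Prop :=
  (connected_input.lookup "data").isSome = true ∧
  (connected_input.lookup "data").getD [] ≠ [] ∧
  ∀ s ∈ (connected_input.lookup "data").getD [], (PySem.Str.split? s "->").map List.length = some 2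
instance (connected_input : List (String × List String)) : Decidable (Pre_most_connected connected_input) := by
  unfold Pre_most_connected; infer_instance
def pvWitness_most_connected : (List (String × List String)) := [("data", ["a->b", "b->c"])]
def Spec_most_connected (connected_input : List (String × List String)) (out : List (String × String)) : Prop := out = most_connected_alt connected_input
instance (connected_input : List (String × List String)) (out : List (String × String)) : Decidable (Spec_most_connected connected_input out) := by unfold Spec_most_connected; infer_instance

-- ===== CLAIM (what is proved, stated in full; the proofs are below) =====
def Claim_equal_most_connected : Prop := ∀ (connected_input : List (String × List String)), Dom_most_connected connected_input → Pre_most_connected connected_input → Spec_most_connected connected_input (most_connected connected_input)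

-- ===== LEMMAS AND PROOFS =====

-- the ordered endpoint pairs contributed by one edge string
def pvPairsOf (s : String) : List (String × String) :=
  match PySem.Str.split? s "->" with
  | some [a, b] => [(a, b), (b, a)]
  | _ => []

-- A's per-edge step coincides with two append-modifies
lemma stepA_modify (d : PySem.Dict String (List String)) (a b : String) :
    (if d.contains a then d.modify a [] (fun v => v ++ [b]) else d.insert a [b]) =
      d.modify a [] (fun v => v ++ [b]) := by
  by_cases h : d.contains a = true
  · simp [h]
  · have h' : d.getD a [] = [] := by
      have := (PySem.Dict.get?_eq_none_iff_contains d a).2 (by simpa using h)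
      simp [PySem.Dict.getD, this]
    simp [h, PySem.Dict.modify, h']

-- A's dict is the modify-append fold over the flattened pair list
lemma dicA_eq (datas : List String) (d : PySem.Dict String (List String)) :
    datas.foldl pvStepA d =
    (datas.flatMap pvPairsOf).foldl (fun d p => d.modify p.1 [] (fun v => v ++ [p.2])) d := by
  induction datas generalizing d with
  | nil => rfl
  | cons s t ih =>
    simp only [List.foldl_cons, List.flatMap_cons, List.foldl_append]
    rw [← ih]
    congr 1
    unfold pvPairsOf pvStepA
    cases h : PySem.Str.split? s "->" with
    | none => simp
    | some parts =>
      match parts with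
      | [] => simp
      | [a] => simp
      | [a, b] => simp [stepA_modify]
      | a :: b :: c :: r => simp

-- B's flat endpoint list is the flattened pair list's first components
lemma ends_eq (datas : List String) (acc : List String) :
    datas.foldl pvEndsStep acc =
    acc ++ (datas.flatMap pvPairsOf).map (fun p => p.1) := by
  induction datas generalizing acc with
  | nil => simp
  | cons s t ih =>
    simp only [List.foldl_cons, List.flatMap_cons, List.map_append, ih]
    rw [← List.append_assoc]
    congr 1
    unfold pvPairsOf pvEndsStep
    cases h : PySem.Str.split? s "->" with
    | none => simp
    | some parts =>
      match parts with
      | [] => simp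
      | [a] => simp
      | [a, b] => simp
      | a :: b :: c :: r => simp

-- first-maximum decomposition of PySem.List.max?
lemma max?_cons_cons (v : String → Int) (a b : String) (t : List String) :
    PySem.List.max? (a :: b :: t) v =
      if v a < v b then PySem.List.max? (b :: t) v else PySem.List.max? (a :: t) v := by
  by_cases h : v a < v b <;> simp [PySem.List.max?, List.foldl_cons, h]

lemma max?_first_aux (v : String → Int) :
    ∀ (t : List String) (a k : String),
      PySem.List.max? (a :: t) v = some k →
      ∃ pre suf, (a :: t) = pre ++ k :: suf ∧ (∀ y ∈ pre, v y < v k) ∧ (∀ y ∈ a :: t, v y ≤ v k) := by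
  intro t
  induction t with
  | nil =>
    intro a k h
    simp [PySem.List.max?] at h
    exact ⟨[], [], by simp [h], by simp, by simp [h]⟩
  | cons b t' ih =>
    intro a k h
    rw [max?_cons_cons] at h
    by_cases hab : v a < v b
    · rw [if_pos hab] at h
      obtain ⟨pre', suf', hdec, hlt, hle⟩ := ih b k h
      refine ⟨a :: pre', suf', by simp [hdec], ?_, ?_⟩
      · intro y hy
        rcases List.mem_cons.1 hy with rfl | hy'
        · exact lt_of_lt_of_le hab (hle b (by simp))
        · exact hlt y hy'
      · intro y hy
        rcases List.mem_cons.1 hy with rfl | hy'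
        · exact le_of_lt (lt_of_lt_of_le hab (hle b (by simp)))
        · exact hle y hy'
    · rw [if_neg hab] at h
      obtain ⟨pre', suf', hdec, hlt, hle⟩ := ih a k h
      cases pre' with
      | nil =>
        have hak : a = k := by simpa using congrArg List.head? hdec
        have hts : t' = suf' := by
          have := congrArg List.tail hdec
          simpa using this
        refine ⟨[], b :: suf', by simp [hak, hts], by simp, ?_⟩
        intro y hy
        rcases List.mem_cons.1 hy with rfl | hy'
        · rw [← hak]
        rcases List.mem_cons.1 hy' with rfl | hy''
        · rw [← hak]; exact le_of_not_gt hab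
        · exact hle y (List.mem_cons.2 (Or.inr hy''))
      | cons p rest =>
        have hp : p = a := by
          have := congrArg List.head? hdec
          simpa using this.symm
        subst hp
        have ht' : t' = rest ++ k :: suf' := by
          have := congrArg List.tail hdec
          simpa using this
        have hpk : v p < v k := hlt p (by simp)
        refine ⟨p :: b :: rest, suf', by simp [ht'], ?_, ?_⟩
        · intro y hy
          rcases List.mem_cons.1 hy with rfl | hy'
          · exact hpk
          rcases List.mem_cons.1 hy' with rfl | hy''
          · exact lt_of_le_of_lt (le_of_not_gt hab) hpk
          · exact hlt y (by simp [hy''])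
        · intro y hy
          rcases List.mem_cons.1 hy with rfl | hy'
          · exact hle y (by simp)
          rcases List.mem_cons.1 hy' with rfl | hy''
          · exact le_trans (le_of_not_gt hab) (le_of_lt hpk)
          · exact hle y (List.mem_cons_of_mem _ hy'')

lemma max?_first {K : List String} {v : String → Int} {k : String}
    (h : PySem.List.max? K v = some k) :
    ∃ pre suf, K = pre ++ k :: suf ∧ (∀ y ∈ pre, v y < v k) ∧ (∀ y ∈ K, v y ≤ v k) := by
  cases K with
  | nil => simp [PySem.List.max?] at h
  | cons a t => exact max?_first_aux v t a k h

lemma max?_cons_cons_id (x y : Int) (l : List Int) :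
    PySem.List.max? (x :: y :: l) (fun z => z) =
      if x < y then PySem.List.max? (y :: l) (fun z => z)
      else PySem.List.max? (x :: l) (fun z => z) := by
  by_cases h : x < y <;> simp [PySem.List.max?, List.foldl_cons, h]

-- first maximum of the mapped value list is the value of the first maximal element
lemma max?_map_aux (v : String → Int) :
    ∀ (t : List String) (a : String),
      PySem.List.max? (v a :: t.map v) (fun z => z) =
        (PySem.List.max? (a :: t) v).map v := by
  intro t
  induction t with
  | nil => intro a; simp [PySem.List.max?]
  | cons b t' ih =>
    intro a
    rw [List.map_cons, max?_cons_cons_id, max?_cons_cons]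
    by_cases h : v a < v b <;> simp [h, ih]

lemma max?_map_id (v : String → Int) (K : List String) :
    PySem.List.max? (K.map v) (fun z => z) = (PySem.List.max? K v).map v := by
  cases K with
  | nil => simp [PySem.List.max?]
  | cons a t => exact max?_map_aux v t a

lemma count_fst (P : List (String × String)) (k : String) :
    List.count k (P.map (fun p => p.1)) = List.countP (fun p => p.1 == k) P := by
  simp [List.count, List.countP_map, Function.comp_def]

-- snoc form of max?
lemma max?_snoc (v : String → Int) (L : List String) (x : String) :
    PySem.List.max? (L ++ [x]) v =
      (match PySem.List.max? L v with
       | none => some x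
       | some m => if v m < v x then some x else some m) := by
  cases h : PySem.List.max? L v with
  | none =>
    rw [(PySem.List.max?_eq_none_iff L v).1 h]
    simp [PySem.List.max?]
  | some m =>
    simp only [PySem.List.max?] at h ⊢
    rw [List.foldl_append, h]
    rfl

-- snoc form of Set.ofList
lemma ofList_snoc (L : List String) (x : String) :
    PySem.Set.ofList (L ++ [x]) =
      (if x ∈ PySem.Set.ofList L then PySem.Set.ofList L else PySem.Set.ofList L ++ [x]) := by
  simp only [PySem.Set.ofList, List.foldl_append, List.foldl_cons, List.foldl_nil,
    PySem.Set.add]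
  split <;> rename_i h <;> simp_all

-- deduplication does not change the first maximal element
lemma max?_ofList (v : String → Int) (E : List String) :
    PySem.List.max? (PySem.Set.ofList E) v = PySem.List.max? E v := by
  induction E using List.reverseRecOn with
  | nil => rfl
  | append_singleton L x ih =>
    rw [max?_snoc, ofList_snoc]
    by_cases hmem : x ∈ L
    · have hx : x ∈ PySem.Set.ofList L := (PySem.Set.mem_ofList L x).2 hmem
      rw [if_pos hx, ih]
      cases hm : PySem.List.max? L v with
      | none =>
        exact absurd hmem (by simp [(PySem.List.max?_eq_none_iff L v).1 hm])
      | some m =>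
        have hle : v x ≤ v m := PySem.List.max?_isMax hm x hmem
        simp [not_lt.2 hle]
    · have hx : x ∉ PySem.Set.ofList L := fun h => hmem ((PySem.Set.mem_ofList L x).1 h)
      rw [if_neg hx, max?_snoc, ih]

-- the strict-improvement scan lands on the first maximal element
lemma scan_first_max (v : String → Int) :
    ∀ (t : List String) (a k : String),
      PySem.List.max? (a :: t) v = some k →
      t.foldl (fun s x => if v x > s.2 then (some x, v x) else s) ((some a : Option String), v a)
        = (some k, v k) := by
  intro t
  induction t with
  | nil =>
    intro a k h
    simp [PySem.List.max?] at h
    simp [h]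
  | cons b t' ih =>
    intro a k h
    rw [max?_cons_cons] at h
    rw [List.foldl_cons]
    by_cases hab : v a < v b
    · rw [if_pos hab] at h
      simpa [gt_iff_lt, hab] using ih b k h
    · rw [if_neg hab] at h
      simpa [gt_iff_lt, hab] using ih a k h

theorem most_connected_spec : Claim_equal_most_connected := by
  intro ci _ hpre
  unfold Spec_most_connected most_connected most_connected_alt
  unfold Pre_most_connected at hpre
  cases hl : ci.lookup "data" with
  | none => simp [hl] at hpre
  | some datas =>
    rw [hl] at hpre
    obtain ⟨-, hne, hsplit⟩ := hpre
    simp only [Option.getD_some] at hne hsplit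
    dsimp only
    rw [dicA_eq, ends_eq, List.nil_append]
    set P := datas.flatMap pvPairsOf with hP
    set E := P.map (fun p => p.1) with hE
    -- E is nonempty
    have hEne : E ≠ [] := by
      cases datas with
      | nil => exact absurd rfl hne
      | cons s t =>
        obtain ⟨parts, hps, hlen⟩ : ∃ parts, PySem.Str.split? s "->" = some parts ∧ parts.length = 2 := by
          have := hsplit s (by simp)
          cases hq : PySem.Str.split? s "->" with
          | none => rw [hq] at this; simp at this
          | some parts => rw [hq] at this; exact ⟨parts, rfl, by simpa using this⟩
        match parts, hlen with
        | [a, b], _ =>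
          simp [hE, hP, List.flatMap_cons, pvPairsOf, hps]
    set K := PySem.Set.ofList E with hK
    set v : String → Int := fun k => (List.count k E : Int) with hv
    -- A's dict
    set dicA := P.foldl (fun d p => d.modify p.1 [] (fun v => v ++ [p.2])) PySem.Dict.empty with hdA
    have hkeysA : dicA.keys = K := by
      rw [hdA]
      have := PySem.Dict.keys_foldl_modify_key (κ := String) (ν := List String)
        P (fun p => p.1) [] (fun _ p v => v ++ [p.2]) PySem.Dict.empty
      exact this
    have hnodup : dicA.keys.Nodup := by
      rw [hdA]
      exact PySem.Dict.nodup_keys_foldl_modify_key P (fun p => p.1) [] (fun _ p v => v ++ [p.2]) PySem.Dict.empty (by simp [PySem.Dict.empty, PySem.Dict.keys])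
    have hitems : dicA.items = K.map (fun k => (k, dicA.getD k [])) := by
      rw [← hkeysA]
      exact PySem.Dict.items_eq_map_keys dicA hnodup []
    have hgetA : ∀ k, dicA.getD k [] = (P.filter (fun p => p.1 == k)).map (fun x => x.2) := by
      intro k
      rw [hdA]
      have := PySem.Dict.getD_foldl_modify_append P PySem.Dict.empty k
      simpa [PySem.Dict.getD, PySem.Dict.get?, PySem.Dict.empty] using this
    have hlengths : dicA.items.map (fun x => ((x.2.length : Int))) = K.map v := by
      rw [hitems, List.map_map]
      apply List.map_congr_left
      intro k _
      simp only [Function.comp_def, hv, hgetA k, List.length_map, hE, count_fst,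
        List.countP_eq_length_filter]
    -- the maximum exists
    have hKne : K ≠ [] := by
      intro hnil
      cases hE' : E with
      | nil => exact hEne hE'
      | cons x xs =>
        have hx : x ∈ K := (PySem.Set.mem_ofList E x).2 (by rw [hE']; simp)
        rw [hnil] at hx; simp at hx
    cases hmB : PySem.List.max? K v with
    | none =>
      exact absurd ((PySem.List.max?_eq_none_iff K v).1 hmB) hKne
    | some kmax =>
      obtain ⟨pre, suf, hdec, hlt, hle⟩ := max?_first hmB
      -- A's side: max over lengths, its index, the item there
      have hmA : PySem.List.max? (dicA.items.map (fun x => ((x.2.length : Int)))) (fun y => y) = some (v kmax) := by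
        rw [hlengths, max?_map_id, hmB, Option.map_some]
      have hvpre : v kmax ∉ pre.map v := by
        intro hmem
        obtain ⟨y, hy, hvy⟩ := List.mem_map.1 hmem
        exact absurd hvy (ne_of_lt (hlt y hy))
      have hidx : PySem.List.index? (dicA.items.map (fun x => ((x.2.length : Int)))) (v kmax) = some pre.length := by
        rw [hlengths, hdec]
        exact (PySem.List.index?_eq_some_iff _ _ _).2
          ⟨pre.map v, suf.map v, by simp, by simp, hvpre⟩
      have hget : (dicA.items)[pre.length]? = some (kmax, dicA.getD kmax []) := by
        rw [hitems, hdec]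
        simp
      -- B's side: the strict-improvement scan over E
      have hmE : PySem.List.max? E v = some kmax := by rw [← max?_ofList, ← hK, hmB]
      have hstep :
          (fun (s : Option String × Int) x =>
              if (PySem.List.count E x : Int) > s.2 then (some x, (PySem.List.count E x : Int)) else s) =
            (fun (s : Option String × Int) x => if v x > s.2 then (some x, v x) else s) := by
        funext s x
        simp [hv, PySem.List.count_eq]
      have hscan :
          E.foldl
            (fun (s : Option String × Int) x =>
              if (PySem.List.count E x : Int) > s.2 then (some x, (PySem.List.count E x : Int)) else s)
            ((none : Option String), (-1 : Int)) = (some kmax, v kmax) := by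
        rw [hstep]
        cases hE' : E with
        | nil => exact absurd hE' hEne
        | cons a t =>
          rw [hE'] at hmE
          have ha : a ∈ E := by rw [hE']; simp
          have hca : (0 : Int) < v a := by
            simp only [hv]
            exact_mod_cast List.count_pos_iff.2 ha
          rw [List.foldl_cons]
          have hcond : v a > (-1 : Int) := by omega
          rw [if_pos hcond]
          exact scan_first_max v t a kmax hmE
      simp only [hmA, hidx, hget, hscan]
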